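-- pv_equiv track=rewrite | github.com/mchu-1/DNA-evolver | evolve_strings.py | score_substrings
-- ===== SOURCE A (Python) =====
-- def score_substrings(substrings_1, substrings_2: list[str], sliding_window: int) -> int:
--     """
--     Score two lists of substrings by number of matches within a sliding window.
--     Input two equal length lists of substrings with equal length.
--     Output homology score between the lists.
--     """
--     homology_score = 0
--     list_length = len(substrings_1)
--
--     for i in range(list_length):
--         left_index = i - sliding_window if i >= sliding_window else 0
--         right_index = i + sliding_window + 1 if list_length - i > sliding_window else list_length
--         if substrings_1[i] in substrings_2[left_index: right_index]:
--             homology_score += 1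
--
--     return homology_score
-- ===== SOURCE B (Python) =====
-- def score_substrings(substrings_1, substrings_2: list[str], sliding_window: int) -> int:
--     """
--     Score two lists of substrings by number of matches within a sliding window.
--     One pass: the window's contents are kept in an incrementally updated count
--     table instead of re-scanning a slice for every position.
--     """
--     n = len(substrings_1)
--     m = len(substrings_2)
--     counts = {}
--     lo = 0
--     hi = 0
--     score = 0
--     for i in range(n):
--         right = min(i + sliding_window + 1, n, m)
--         left = min(max(i - sliding_window, 0), right)
--         while hi < right:
--             s = substrings_2[hi]
--             counts[s] = counts.get(s, 0) + 1
--             hi += 1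
--         while lo < left:
--             s = substrings_2[lo]
--             counts[s] = counts.get(s, 0) - 1
--             lo += 1
--         if counts.get(substrings_1[i], 0) > 0:
--             score += 1
--     return score
-- ===== Notes on version B (the rewrite author's own statement) =====
-- stated objective: faster
-- what changed: A re-slices substrings_2 and scans the slice for every position (O(n*w) and more copying); B makes one pass with two advancing pointers and an incrementally updated dict of window counts, testing membership in O(1).
-- intended difference: For negative sliding_window, A's right bound i+sliding_window+1 can go negative and Python's slice wraps it to the end of substrings_2, so A counts matches against a window taken from the tail (e.g. score_substrings(['a'],['x','x','a','x'],-2) returns 1); B treats a negative window as empty and returns 0, the intended reading of a nonsensical negative window size. — e.g. on score_substrings(["a"], ["x", "x", "a", "x"], -2): A returns 1, B returns 0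
import Mathlib
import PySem

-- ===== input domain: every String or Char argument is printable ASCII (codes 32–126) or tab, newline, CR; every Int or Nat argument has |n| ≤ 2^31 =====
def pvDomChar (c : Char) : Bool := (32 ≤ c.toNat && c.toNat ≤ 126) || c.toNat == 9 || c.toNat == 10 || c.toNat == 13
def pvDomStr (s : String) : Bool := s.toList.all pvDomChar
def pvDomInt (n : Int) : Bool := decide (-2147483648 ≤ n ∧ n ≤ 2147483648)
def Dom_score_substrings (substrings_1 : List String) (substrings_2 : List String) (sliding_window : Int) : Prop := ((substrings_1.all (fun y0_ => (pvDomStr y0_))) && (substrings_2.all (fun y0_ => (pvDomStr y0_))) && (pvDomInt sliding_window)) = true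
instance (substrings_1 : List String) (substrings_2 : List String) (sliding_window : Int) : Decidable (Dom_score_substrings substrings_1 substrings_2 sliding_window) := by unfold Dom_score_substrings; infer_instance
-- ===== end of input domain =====

-- B replaces A's per-position window re-scan by a single pass that maintains the window's
-- contents in an incrementally updated count table (objective: faster, O(n+m) vs O(n·w)).

-- ===== PORT A =====
def score_substrings (substrings_1 : List String) (substrings_2 : List String) (sliding_window : Int) : Int :=
  let list_length : Int := PySem.List.len substrings_1
  (PySem.List.pyRange 0 list_length 1).foldl (fun homology_score i =>
    let left_index : Int := if i ≥ sliding_window then i - sliding_window else 0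
    let right_index : Int := if list_length - i > sliding_window then i + sliding_window + 1 else list_length
    if (PySem.List.slice substrings_2 (some left_index) (some right_index)).contains
        (PySem.List.pyGetD substrings_1 i "") then homology_score + 1 else homology_score) 0

-- ===== PORT B =====
-- body of B's for-loop (state = (counts, lo, hi, score)); the two whiles are folds over the
-- index ranges they traverse, with hi/lo landing at max hi right / max lo left
def pvAltStep (substrings_1 : List String) (substrings_2 : List String) (sliding_window : Int)
    (st : PySem.Dict String Int × Int × Int × Int) (i : Int) : PySem.Dict String Int × Int × Int × Int :=
  let n : Int := PySem.List.len substrings_1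
  let m : Int := PySem.List.len substrings_2
  let right := min (min (i + sliding_window + 1) n) m
  let left := min (max (i - sliding_window) 0) right
  let c1 := (PySem.List.pyRange st.2.2.1 right 1).foldl
      (fun d j => d.insert (PySem.List.pyGetD substrings_2 j "")
        (d.getD (PySem.List.pyGetD substrings_2 j "") 0 + 1)) st.1
  let hi' := max st.2.2.1 right
  let c2 := (PySem.List.pyRange st.2.1 left 1).foldl
      (fun d j => d.insert (PySem.List.pyGetD substrings_2 j "")
        (d.getD (PySem.List.pyGetD substrings_2 j "") 0 - 1)) c1
  let lo' := max st.2.1 left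
  let score' := if c2.getD (PySem.List.pyGetD substrings_1 i "") 0 > 0 then st.2.2.2 + 1 else st.2.2.2
  (c2, lo', hi', score')

def score_substrings_alt (substrings_1 : List String) (substrings_2 : List String) (sliding_window : Int) : Int :=
  let n : Int := PySem.List.len substrings_1
  ((PySem.List.pyRange 0 n 1).foldl (pvAltStep substrings_1 substrings_2 sliding_window)
    ((PySem.Dict.empty : PySem.Dict String Int), (0 : Int), (0 : Int), (0 : Int))).2.2.2

-- ===== PRECONDITION & SPEC =====
-- For a negative sliding_window A's slice bound i+sliding_window+1 can fall through Python's
-- negative-index wraparound, so A matches some positions against a window taken from the END of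
-- substrings_2 and returns a positive score; B treats a negative window as empty and returns 0,
-- the intended reading of a (nonsensical) negative window size.
def D_score_substrings (substrings_1 : List String) (substrings_2 : List String) (sliding_window : Int) : Prop :=
  sliding_window < 0 ∧ ∃ i < substrings_1.length,
    substrings_1.getD i "" ∈ PySem.List.slice substrings_2
      (some ((i : Int) - sliding_window)) (some ((i : Int) + sliding_window + 1))
instance (substrings_1 : List String) (substrings_2 : List String) (sliding_window : Int) : Decidable (D_score_substrings substrings_1 substrings_2 sliding_window) := by unfold D_score_substrings; infer_instance

def Spec_score_substrings (substrings_1 : List String) (substrings_2 : List String) (sliding_window : Int) (out : Int) : Prop := ¬ D_score_substrings substrings_1 substrings_2 sliding_window → out = score_substrings_alt substrings_1 substrings_2 sliding_window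
instance (substrings_1 : List String) (substrings_2 : List String) (sliding_window : Int) (out : Int) : Decidable (Spec_score_substrings substrings_1 substrings_2 sliding_window out) := by unfold Spec_score_substrings; infer_instance

def pvDiffWitness_score_substrings : List String × List String × Int := (["a"], ["x", "x", "a", "x"], -2)
def pvDiffWitnessOut_score_substrings : Int × Int := (1, 0)

-- ===== CLAIM (what is proved, stated in full; the proofs are below) =====
def Claim_unchanged_score_substrings : Prop := ∀ (substrings_1 : List String) (substrings_2 : List String) (sliding_window : Int), Dom_score_substrings substrings_1 substrings_2 sliding_window → Spec_score_substrings substrings_1 substrings_2 sliding_window (score_substrings substrings_1 substrings_2 sliding_window)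
def Claim_changed_score_substrings : Prop := Dom_score_substrings (pvDiffWitness_score_substrings.1) (pvDiffWitness_score_substrings.2.1) (pvDiffWitness_score_substrings.2.2) ∧ D_score_substrings (pvDiffWitness_score_substrings.1) (pvDiffWitness_score_substrings.2.1) (pvDiffWitness_score_substrings.2.2) ∧ score_substrings (pvDiffWitness_score_substrings.1) (pvDiffWitness_score_substrings.2.1) (pvDiffWitness_score_substrings.2.2) = pvDiffWitnessOut_score_substrings.1 ∧ score_substrings_alt (pvDiffWitness_score_substrings.1) (pvDiffWitness_score_substrings.2.1) (pvDiffWitness_score_substrings.2.2) = pvDiffWitnessOut_score_substrings.2 ∧ pvDiffWitnessOut_score_substrings.1 ≠ pvDiffWitnessOut_score_substrings.2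
def Claim_exact_score_substrings : Prop := ∀ (substrings_1 : List String) (substrings_2 : List String) (sliding_window : Int), Dom_score_substrings substrings_1 substrings_2 sliding_window → D_score_substrings substrings_1 substrings_2 sliding_window → score_substrings substrings_1 substrings_2 sliding_window ≠ score_substrings_alt substrings_1 substrings_2 sliding_window

-- ===== LEMMAS AND PROOFS =====

-- A's per-position indicator (the contains-test of A's loop body)
def pvAInd (substrings_1 : List String) (substrings_2 : List String) (sliding_window : Int) (i : Int) : Bool :=
  (PySem.List.slice substrings_2
    (some (if i ≥ sliding_window then i - sliding_window else 0))
    (some (if (substrings_1.length : Int) - i > sliding_window then i + sliding_window + 1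
           else (substrings_1.length : Int)))).contains (PySem.List.pyGetD substrings_1 i "")

theorem pvA_eq_countP (s1 s2 : List String) (w : Int) :
    score_substrings s1 s2 w = (((PySem.List.pyRange 0 (s1.length : Int) 1).countP (pvAInd s1 s2 w) : Nat) : Int) := by
  have h : score_substrings s1 s2 w =
      (PySem.List.pyRange 0 (s1.length : Int) 1).foldl
        (fun acc i => if pvAInd s1 s2 w i then acc + 1 else acc) 0 := rfl
  rw [h, PySem.List.foldl_if_add_one]
  simp

-- counting lemma for the decrement loop (mirror of PySem.Dict.getD_foldl_insert_add_one)
theorem pv_getD_foldl_insert_sub_one (l : List String) (d : PySem.Dict String Int) (v : String) :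
    (l.foldl (fun d x => d.insert x (d.getD x 0 - 1)) d).getD v 0 = d.getD v 0 - (l.count v : Int) := by
  induction l generalizing d with
  | nil => simp
  | cons x t ih =>
    simp only [List.foldl_cons, ih, PySem.Dict.getD_insert, List.count_cons]
    by_cases h : v = x
    · simp [h]; ring
    · simp [h]; exact fun hx => h hx.symm

-- the index range [a, b) read through s2 is the corresponding drop/take segment
theorem pv_map_pyRange_getD (xs : List String) (a b : Int) (ha : 0 ≤ a) (hb : b ≤ (xs.length : Int)) :
    (PySem.List.pyRange a b 1).map (fun j => PySem.List.pyGetD xs j "") =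
      (xs.drop a.toNat).take (b.toNat - a.toNat) := by
  by_cases hba : b ≤ a
  · rw [PySem.List.pyRange_one_eq_nil hba]
    have : b.toNat - a.toNat = 0 := by omega
    simp [this]
  · push_neg at hba
    have hlt : a.toNat < xs.length := by omega
    rw [PySem.List.pyRange_one_cons hba, List.map_cons,
      pv_map_pyRange_getD xs (a+1) b (by omega) hb,
      PySem.List.pyGetD_eq_getElem xs "" ha (by omega),
      List.drop_eq_getElem_cons hlt]
    have h1 : (a+1).toNat = a.toNat + 1 := by omega
    have h2 : b.toNat - a.toNat = (b.toNat - (a.toNat + 1)) + 1 := by omega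
    rw [h1, h2, List.take_succ_cons]
termination_by (b - a).toNat
decreasing_by omega

-- membership in a drop/take segment, as an existential over absolute indices
theorem pv_mem_take_drop_iff (xs : List String) (a k : Nat) (v : String) :
    v ∈ (xs.drop a).take k ↔ ∃ j : Nat, a ≤ j ∧ j < a + k ∧ j < xs.length ∧ xs.getD j "" = v := by
  constructor
  · intro h
    rcases List.mem_iff_getElem.1 h with ⟨t, ht, hv⟩
    have ht' : t < min k (xs.length - a) := by
      simpa [List.length_take, List.length_drop] using ht
    have h2 : t < k := by omega
    have hjl : a + t < xs.length := by omega
    refine ⟨a + t, by omega, by omega, hjl, ?_⟩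
    rw [List.getD_eq_getElem xs "" hjl, ← hv, List.getElem_take, List.getElem_drop]
  · rintro ⟨j, h1, h2, h3, h4⟩
    have htl : j - a < (xs.drop a).length := by simp [List.length_drop]; omega
    have h5 : j - a < ((xs.drop a).take k).length := by simp [List.length_take, List.length_drop]; omega
    rw [List.mem_iff_getElem]
    refine ⟨j - a, h5, ?_⟩
    rw [List.getElem_take, List.getElem_drop, ← List.getD_eq_getElem xs "" (by omega : a + (j - a) < xs.length)]
    have : a + (j - a) = j := by omega
    rw [this, h4]

-- membership in a Python slice with nonnegative start, as an existential over absolute indices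
theorem pv_mem_slice_iff (xs : List String) (a b : Int) (v : String) (ha : 0 ≤ a) :
    v ∈ PySem.List.slice xs (some a) (some b) ↔
      ∃ j : Nat, a ≤ (j : Int) ∧ ((j : Int) < b ∨ (b < 0 ∧ (j : Int) < (xs.length : Int) + b)) ∧
        j < xs.length ∧ xs.getD j "" = v := by
  unfold PySem.List.slice PySem.List.clampIdx
  simp only
  rw [pv_mem_take_drop_iff]
  constructor
  · rintro ⟨j, h1, h2, h3, h4⟩
    refine ⟨j, by split_ifs at h1 h2 <;> omega, by split_ifs at h1 h2 <;> omega, h3, h4⟩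
  · rintro ⟨j, h1, h2, h3, h4⟩
    refine ⟨j, by split_ifs <;> omega, by split_ifs <;> omega, h3, h4⟩

-- two adjacent segments concatenate
theorem pv_seg_append (xs : List String) (a b c : Nat) (hab : a ≤ b) (hbc : b ≤ c) :
    (xs.drop a).take (b - a) ++ (xs.drop b).take (c - b) = (xs.drop a).take (c - a) := by
  have h1 : xs.drop b = (xs.drop a).drop (b - a) := by rw [List.drop_drop]; congr 1; omega
  rw [h1, ← List.take_add]
  congr 1; omega


-- getD through the add-while's fold (body written as in pvAltStep)
theorem pv_fold_add (s2 : List String) (c : PySem.Dict String Int) (a b : Int) (v : String)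
    (ha : 0 ≤ a) (hb : b ≤ (s2.length : Int)) :
    ((PySem.List.pyRange a b 1).foldl
      (fun d j => d.insert (PySem.List.pyGetD s2 j "") (d.getD (PySem.List.pyGetD s2 j "") 0 + 1)) c).getD v 0
      = c.getD v 0 + (((s2.drop a.toNat).take (b.toNat - a.toNat)).count v : Int) := by
  have h : (PySem.List.pyRange a b 1).foldl
      (fun d j => d.insert (PySem.List.pyGetD s2 j "") (d.getD (PySem.List.pyGetD s2 j "") 0 + 1)) c
      = ((PySem.List.pyRange a b 1).map (fun j => PySem.List.pyGetD s2 j "")).foldl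
          (fun d x => d.insert x (d.getD x 0 + 1)) c :=
    (List.foldl_map (f := fun (j : Int) => PySem.List.pyGetD s2 j "")
      (g := fun (d : PySem.Dict String Int) (x : String) => d.insert x (d.getD x 0 + 1))).symm
  rw [h, pv_map_pyRange_getD _ _ _ ha hb, PySem.Dict.getD_foldl_insert_add_one]

-- getD through the remove-while's fold
theorem pv_fold_sub (s2 : List String) (c : PySem.Dict String Int) (a b : Int) (v : String)
    (ha : 0 ≤ a) (hb : b ≤ (s2.length : Int)) :
    ((PySem.List.pyRange a b 1).foldl
      (fun d j => d.insert (PySem.List.pyGetD s2 j "") (d.getD (PySem.List.pyGetD s2 j "") 0 - 1)) c).getD v 0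
      = c.getD v 0 - (((s2.drop a.toNat).take (b.toNat - a.toNat)).count v : Int) := by
  have h : (PySem.List.pyRange a b 1).foldl
      (fun d j => d.insert (PySem.List.pyGetD s2 j "") (d.getD (PySem.List.pyGetD s2 j "") 0 - 1)) c
      = ((PySem.List.pyRange a b 1).map (fun j => PySem.List.pyGetD s2 j "")).foldl
          (fun d x => d.insert x (d.getD x 0 - 1)) c :=
    (List.foldl_map (f := fun (j : Int) => PySem.List.pyGetD s2 j "")
      (g := fun (d : PySem.Dict String Int) (x : String) => d.insert x (d.getD x 0 - 1))).symm
  rw [h, pv_map_pyRange_getD _ _ _ ha hb, pv_getD_foldl_insert_sub_one]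

-- the components of one loop-body application
theorem pv_step_fst (s1 s2 : List String) (w : Int) (c : PySem.Dict String Int) (lo hi sc i : Int) :
    (pvAltStep s1 s2 w (c, lo, hi, sc) i).1 =
      (PySem.List.pyRange lo
          (min (max (i - w) 0) (min (min (i + w + 1) (s1.length : Int)) (s2.length : Int))) 1).foldl
        (fun d j => d.insert (PySem.List.pyGetD s2 j "") (d.getD (PySem.List.pyGetD s2 j "") 0 - 1))
        ((PySem.List.pyRange hi (min (min (i + w + 1) (s1.length : Int)) (s2.length : Int)) 1).foldl
          (fun d j => d.insert (PySem.List.pyGetD s2 j "") (d.getD (PySem.List.pyGetD s2 j "") 0 + 1)) c) := rfl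

theorem pv_step_lo (s1 s2 : List String) (w : Int) (c : PySem.Dict String Int) (lo hi sc i : Int) :
    (pvAltStep s1 s2 w (c, lo, hi, sc) i).2.1 =
      max lo (min (max (i - w) 0) (min (min (i + w + 1) (s1.length : Int)) (s2.length : Int))) := rfl

theorem pv_step_hi (s1 s2 : List String) (w : Int) (c : PySem.Dict String Int) (lo hi sc i : Int) :
    (pvAltStep s1 s2 w (c, lo, hi, sc) i).2.2.1 =
      max hi (min (min (i + w + 1) (s1.length : Int)) (s2.length : Int)) := rfl

theorem pv_step_sc (s1 s2 : List String) (w : Int) (c : PySem.Dict String Int) (lo hi sc i : Int) :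
    (pvAltStep s1 s2 w (c, lo, hi, sc) i).2.2.2 =
      if (pvAltStep s1 s2 w (c, lo, hi, sc) i).1.getD (PySem.List.pyGetD s1 i "") 0 > 0
      then sc + 1 else sc := rfl

-- B's loop, nonnegative window: it adds exactly A's indicators
theorem pv_bfold_pos (s1 s2 : List String) (w : Int) (hw : 0 ≤ w) :
    ∀ (k : Nat) (i : Int) (c : PySem.Dict String Int) (lo hi sc : Int),
      ((s1.length : Int) - i).toNat = k → 0 ≤ i → 0 ≤ lo → lo ≤ hi → hi ≤ (s2.length : Int) →
      lo ≤ min (max (i - w) 0) (min (min (i + w + 1) (s1.length : Int)) (s2.length : Int)) →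
      hi ≤ min (min (i + w + 1) (s1.length : Int)) (s2.length : Int) →
      (∀ v, c.getD v 0 = (((s2.drop lo.toNat).take (hi.toNat - lo.toNat)).count v : Int)) →
      ((PySem.List.pyRange i (s1.length : Int) 1).foldl (pvAltStep s1 s2 w) (c, lo, hi, sc)).2.2.2
        = sc + (((PySem.List.pyRange i (s1.length : Int) 1).countP (pvAInd s1 s2 w) : Nat) : Int) := by
  intro k
  induction k with
  | zero =>
    intro i c lo hi sc hk h0 hlo0 hlohi hhim hlol hhir hc
    rw [PySem.List.pyRange_one_eq_nil (by omega)]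
    simp
  | succ k ih =>
    intro i c lo hi sc hk h0 hlo0 hlohi hhim hlol hhir hc
    have hn : (0:Int) ≤ (s1.length : Int) := Int.natCast_nonneg _
    have hm : (0:Int) ≤ (s2.length : Int) := Int.natCast_nonneg _
    have hin : i < (s1.length : Int) := by omega
    rw [PySem.List.pyRange_one_cons hin, List.foldl_cons, List.countP_cons]
    set r := min (min (i + w + 1) (s1.length : Int)) (s2.length : Int) with hrdef
    set l2 := min (max (i - w) 0) r with hl2def
    have hc2 : ∀ v, (pvAltStep s1 s2 w (c, lo, hi, sc) i).1.getD v 0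
        = (((s2.drop l2.toNat).take (r.toNat - l2.toNat)).count v : Int) := by
      intro v
      rw [pv_step_fst s1 s2 w c lo hi sc i, ← hrdef, ← hl2def]
      rw [pv_fold_sub _ _ _ _ _ (by omega) (by omega),
          pv_fold_add _ _ _ _ _ (by omega) (by omega), hc v]
      have h1 := congrArg (List.count v)
        (pv_seg_append s2 lo.toNat hi.toNat r.toNat (by omega) (by omega))
      have h2 := congrArg (List.count v)
        (pv_seg_append s2 lo.toNat l2.toNat r.toNat (by omega) (by omega))
      rw [List.count_append] at h1 h2
      omega
    have hkey : ((pvAltStep s1 s2 w (c, lo, hi, sc) i).1.getD (PySem.List.pyGetD s1 i "") 0 > 0)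
        ↔ pvAInd s1 s2 w i = true := by
      rw [hc2]
      constructor
      · intro hpos
        have hmem : (PySem.List.pyGetD s1 i "") ∈ (s2.drop l2.toNat).take (r.toNat - l2.toNat) :=
          List.count_pos_iff.1 (by exact_mod_cast hpos)
        rcases (pv_mem_take_drop_iff _ _ _ _).1 hmem with ⟨j, hj1, hj2, hj3, hj4⟩
        unfold pvAInd
        rw [List.contains_iff_mem, pv_mem_slice_iff _ _ _ _ (by split_ifs <;> omega)]
        exact ⟨j, by split_ifs <;> omega, Or.inl (by split_ifs <;> omega), hj3, hj4⟩
      · intro hind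
        unfold pvAInd at hind
        rw [List.contains_iff_mem, pv_mem_slice_iff _ _ _ _ (by split_ifs <;> omega)] at hind
        rcases hind with ⟨j, hj1, hj2, hj3, hj4⟩
        have hj2' : (j : Int) < if (s1.length : Int) - i > w then i + w + 1 else (s1.length : Int) := by
          rcases hj2 with h | h
          · exact h
          · split_ifs at h ⊢ <;> omega
        have hmem : (PySem.List.pyGetD s1 i "") ∈ (s2.drop l2.toNat).take (r.toNat - l2.toNat) := by
          refine (pv_mem_take_drop_iff _ _ _ _).2 ⟨j, ?_, ?_, hj3, hj4⟩
          · split_ifs at hj1 <;> omega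
          · split_ifs at hj2' <;> omega
        exact_mod_cast List.count_pos_iff.2 hmem
    have heta : pvAltStep s1 s2 w (c, lo, hi, sc) i
        = ((pvAltStep s1 s2 w (c, lo, hi, sc) i).1, (pvAltStep s1 s2 w (c, lo, hi, sc) i).2.1,
           (pvAltStep s1 s2 w (c, lo, hi, sc) i).2.2.1, (pvAltStep s1 s2 w (c, lo, hi, sc) i).2.2.2) := rfl
    rw [heta, pv_step_lo s1 s2 w c lo hi sc i, pv_step_hi s1 s2 w c lo hi sc i, ← hrdef, ← hl2def,
        max_eq_right hlol, max_eq_right hhir, pv_step_sc s1 s2 w c lo hi sc i]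
    by_cases hca : pvAInd s1 s2 w i = true
    · rw [if_pos (hkey.2 hca), if_pos hca]
      rw [ih (i + 1) _ l2 r (sc + 1) (by omega) (by omega) (by omega) (by omega) (by omega)
        (by omega) (by omega) hc2]
      push_cast
      ring
    · rw [if_neg (fun hpos => hca (hkey.1 hpos)), if_neg hca]
      rw [ih (i + 1) _ l2 r sc (by omega) (by omega) (by omega) (by omega) (by omega)
        (by omega) (by omega) hc2]
      push_cast
      ring

-- B's loop, negative window: the window stays empty and the score stays put
theorem pv_bfold_neg (s1 s2 : List String) (w : Int) (hw : w < 0) :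
    ∀ (k : Nat) (i : Int) (c : PySem.Dict String Int) (lo hi sc : Int),
      ((s1.length : Int) - i).toNat = k → 0 ≤ i → 0 ≤ lo → lo = hi → hi ≤ (s2.length : Int) →
      (∀ v, c.getD v 0 = 0) →
      ((PySem.List.pyRange i (s1.length : Int) 1).foldl (pvAltStep s1 s2 w) (c, lo, hi, sc)).2.2.2 = sc := by
  intro k
  induction k with
  | zero =>
    intro i c lo hi sc hk h0 hlo0 hlohi hhim hc
    rw [PySem.List.pyRange_one_eq_nil (by omega)]
    rfl
  | succ k ih =>
    intro i c lo hi sc hk h0 hlo0 hlohi hhim hc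
    subst hlohi
    have hn : (0:Int) ≤ (s1.length : Int) := Int.natCast_nonneg _
    have hm : (0:Int) ≤ (s2.length : Int) := Int.natCast_nonneg _
    have hin : i < (s1.length : Int) := by omega
    rw [PySem.List.pyRange_one_cons hin, List.foldl_cons]
    have hll : min (max (i - w) 0) (min (min (i + w + 1) (s1.length : Int)) (s2.length : Int))
        = min (min (i + w + 1) (s1.length : Int)) (s2.length : Int) := by omega
    have hc2 : ∀ v, (pvAltStep s1 s2 w (c, lo, lo, sc) i).1.getD v 0 = 0 := by
      intro v
      rw [pv_step_fst s1 s2 w c lo lo sc i, hll]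
      rw [pv_fold_sub _ _ _ _ _ (by omega) (by omega),
          pv_fold_add _ _ _ _ _ (by omega) (by omega)]
      rw [hc v]
      ring
    have hsc : (pvAltStep s1 s2 w (c, lo, lo, sc) i).2.2.2 = sc := by
      rw [pv_step_sc s1 s2 w c lo lo sc i, hc2]
      norm_num
    have heta : pvAltStep s1 s2 w (c, lo, lo, sc) i
        = ((pvAltStep s1 s2 w (c, lo, lo, sc) i).1, (pvAltStep s1 s2 w (c, lo, lo, sc) i).2.1,
           (pvAltStep s1 s2 w (c, lo, lo, sc) i).2.2.1, (pvAltStep s1 s2 w (c, lo, lo, sc) i).2.2.2) := rfl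
    rw [heta, hsc, pv_step_lo s1 s2 w c lo lo sc i, pv_step_hi s1 s2 w c lo lo sc i, hll]
    exact ih (i + 1) _ _ _ sc (by omega) (by omega) (by omega) rfl (by omega) hc2

-- for a negative window, A's indicator at i is exactly D's membership test at i.toNat
theorem pv_aind_neg (s1 s2 : List String) (w : Int) (hw : w < 0) (i : Int)
    (h0 : 0 ≤ i) (h1 : i < (s1.length : Int)) :
    pvAInd s1 s2 w i = true ↔
      s1.getD i.toNat "" ∈ PySem.List.slice s2
        (some ((i.toNat : Int) - w)) (some ((i.toNat : Int) + w + 1)) := by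
  unfold pvAInd
  rw [List.contains_iff_mem, if_pos (by omega : i ≥ w), if_pos (by omega : (s1.length : Int) - i > w),
    PySem.List.pyGetD_eq_getElem s1 "" h0 h1,
    ← List.getD_eq_getElem s1 "" (by omega : i.toNat < s1.length)]
  have hi : (i.toNat : Int) = i := by omega
  rw [hi]

-- A's indicators are all false for a negative window outside D
theorem pv_aneg (s1 s2 : List String) (w : Int) (hw : w < 0)
    (hnd : ¬ D_score_substrings s1 s2 w) :
    ∀ i ∈ PySem.List.pyRange 0 (s1.length : Int) 1, ¬ pvAInd s1 s2 w i = true := by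
  intro i hi hind
  rcases PySem.List.mem_pyRange_one.1 hi with ⟨h0, h1⟩
  exact hnd ⟨hw, i.toNat, by omega, (pv_aind_neg s1 s2 w hw i h0 h1).1 hind⟩

theorem pv_balt_neg (s1 s2 : List String) (w : Int) (hw : w < 0) :
    score_substrings_alt s1 s2 w = 0 := by
  have h := pv_bfold_neg s1 s2 w hw ((s1.length : Int) - 0).toNat 0 PySem.Dict.empty 0 0 0
    rfl le_rfl le_rfl rfl (Int.natCast_nonneg _) (by intro v; simp [PySem.Dict.getD_empty])
  exact h

-- ===== VERDICT (by name: the statement is the Claim_ definition above) =====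
theorem score_substrings_spec : Claim_unchanged_score_substrings := by
  intro s1 s2 w _hdom
  intro hnd
  have hn : (0:Int) ≤ (s1.length : Int) := Int.natCast_nonneg _
  have hm : (0:Int) ≤ (s2.length : Int) := Int.natCast_nonneg _
  by_cases hw : 0 ≤ w
  · have hB := pv_bfold_pos s1 s2 w hw ((s1.length : Int) - 0).toNat 0 PySem.Dict.empty 0 0 0
      rfl le_rfl le_rfl le_rfl hm (by omega) (by omega)
      (by intro v; simp [PySem.Dict.getD_empty])
    rw [pvA_eq_countP]
    have hBdef : score_substrings_alt s1 s2 w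
        = ((PySem.List.pyRange 0 (s1.length : Int) 1).foldl (pvAltStep s1 s2 w)
            ((PySem.Dict.empty : PySem.Dict String Int), (0 : Int), (0 : Int), (0 : Int))).2.2.2 := rfl
    rw [hBdef, hB]
    ring
  · push_neg at hw
    rw [pvA_eq_countP, pv_balt_neg s1 s2 w hw]
    rw [List.countP_eq_zero.2 (pv_aneg s1 s2 w hw hnd)]
    rfl

theorem score_substrings_changed : Claim_changed_score_substrings := by
  unfold Claim_changed_score_substrings; decide

theorem score_substrings_tight : Claim_exact_score_substrings := by
  intro s1 s2 w _hdom hd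
  rcases hd with ⟨hw, i, hi, hmem⟩
  rw [pv_balt_neg s1 s2 w hw, pvA_eq_countP]
  have hpos : 0 < (PySem.List.pyRange 0 (s1.length : Int) 1).countP (pvAInd s1 s2 w) := by
    rw [List.countP_pos_iff]
    refine ⟨(i : Int), PySem.List.mem_pyRange_one.2 ⟨by omega, by exact_mod_cast hi⟩, ?_⟩
    rw [pv_aind_neg s1 s2 w hw (i : Int) (by omega) (by exact_mod_cast hi)]
    simpa using hmem
  exact_mod_cast hpos.ne'
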